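-- pv_equiv track=rewrite | github.com/AyushAgnihotri2025/CP-Solutions | GeeksforGeeks/Python3/Medium/Special Numbers/special-numbers.py | getSpecialNumber
-- ===== SOURCE A (Python) =====
-- def getSpecialNumber(n):
--     # code here
--     digits = []
--     n -= 1
--     while n:
--         digits.append(n % 6)
--         n //= 6
--     ans = 0
--     for d in reversed(digits):
--         ans = (ans * 10 + d)
--     return ans
-- ===== SOURCE B (Python) =====
-- def getSpecialNumber(n):
--     m = n - 1
--     p = 1
--     while p * 6 <= m:
--         p *= 6
--     ans = 0
--     while p:
--         ans = ans * 10 + m // p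
--         m %= p
--         p //= 6
--     return ans
-- ===== Notes on version B (the rewrite author's own statement) =====
-- stated objective: alternative
-- what changed: B emits base-6 digits most-significant-first by first finding the highest power of 6 not exceeding n-1 and then peeling digits top-down with //p and %=p, instead of A's least-significant-first extraction into a list followed by a reversed fold.
-- outside the precondition, e.g. on getSpecialNumber(0): A does not finish within the time limit, B returns -1
import Mathlib
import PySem

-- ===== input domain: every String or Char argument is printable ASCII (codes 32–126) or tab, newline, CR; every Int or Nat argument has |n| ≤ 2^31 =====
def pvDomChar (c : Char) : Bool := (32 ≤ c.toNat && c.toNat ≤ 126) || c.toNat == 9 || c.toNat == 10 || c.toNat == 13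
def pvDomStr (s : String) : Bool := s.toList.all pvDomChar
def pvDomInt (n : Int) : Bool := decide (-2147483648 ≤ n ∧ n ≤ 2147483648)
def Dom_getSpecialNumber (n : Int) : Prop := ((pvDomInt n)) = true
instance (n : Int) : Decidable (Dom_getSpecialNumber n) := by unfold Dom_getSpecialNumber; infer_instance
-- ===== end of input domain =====

-- B extracts base-6 digits most-significant-first via the highest power of 6, instead of A's LSB-first digit list + reversed fold; objective: alternative (no list, opposite digit order).


-- ===== PORT A =====
-- termination helper for both ports' '//= 6' loops (the 0 < n guards only make the loops total)
theorem pvFdivLt (n : Int) (h : 0 < n) : (PySem.Int.floordiv n 6).toNat < n.toNat := by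
  rw [PySem.Int.floordiv_eq_ediv_of_pos (by omega)]
  omega

def getSpecialNumberDigits (n : Int) (digits : List Int) : List Int :=
  if h : 0 < n then
    getSpecialNumberDigits (PySem.Int.floordiv n 6) (digits ++ [PySem.Int.mod n 6])
  else digits
termination_by n.toNat
decreasing_by exact pvFdivLt n h

def getSpecialNumber (n : Int) : Int :=
  let digits := getSpecialNumberDigits (n - 1) []
  digits.reverse.foldl (fun ans d => ans * 10 + d) 0

-- ===== PORT B =====
-- 'while p * 6 <= m: p *= 6'; the 0 < p conjunct is a totality guard only (p starts at 1 and only grows)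
def pvPow6Loop (m p : Int) : Int :=
  if h : 0 < p ∧ p * 6 ≤ m then pvPow6Loop m (p * 6) else p
termination_by (m - p).toNat
decreasing_by omega

-- 'while p: ans = ans*10 + m//p; m %= p; p //= 6'; Python's 'while p' is p ≠ 0; the 0 < p guard is equivalent on reachable states (p ≥ 0 throughout) and makes the loop total
def pvDigitLoop (p m ans : Int) : Int :=
  if h : 0 < p then
    pvDigitLoop (PySem.Int.floordiv p 6) (PySem.Int.mod m p)
      (ans * 10 + PySem.Int.floordiv m p)
  else ans
termination_by p.toNat
decreasing_by exact pvFdivLt p h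

def getSpecialNumber_alt (n : Int) : Int :=
  let m := n - 1
  pvDigitLoop (pvPow6Loop m 1) m 0

-- ===== PRECONDITION & SPEC =====
-- Pre_ excludes n ≤ 0, where Python A never returns: its 'while n' loop runs forever there (A returns exactly on n ≥ 1).
def Pre_getSpecialNumber (n : Int) : Prop := 1 ≤ n
instance (n : Int) : Decidable (Pre_getSpecialNumber n) := by unfold Pre_getSpecialNumber; infer_instance
def pvWitness_getSpecialNumber : Int := 10
def Spec_getSpecialNumber (n : Int) (out : Int) : Prop := out = getSpecialNumber_alt n
instance (n : Int) (out : Int) : Decidable (Spec_getSpecialNumber n out) := by unfold Spec_getSpecialNumber; infer_instance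

-- ===== CLAIM (what is proved, stated in full; the proofs are below) =====
def Claim_equal_getSpecialNumber : Prop := ∀ (n : Int), Dom_getSpecialNumber n → Pre_getSpecialNumber n → Spec_getSpecialNumber n (getSpecialNumber n)

-- ===== LEMMAS AND PROOFS =====

-- common reference value: the MSB-first recursion f m = f (m/6) * 10 + m % 6
def pvF (m : Int) : Int :=
  if h : 0 < m then pvF (m / 6) * 10 + m % 6 else 0
termination_by m.toNat
decreasing_by omega

theorem pvF_zero : pvF 0 = 0 := by rw [pvF]; simp

theorem pvF_step (r : Int) (h : 0 ≤ r) : pvF r = pvF (r / 6) * 10 + r % 6 := by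
  by_cases hr : 0 < r
  · rw [pvF, dif_pos hr]
  · have h0 : r = 0 := by omega
    subst h0
    rw [pvF_zero, Int.zero_ediv, pvF_zero]
    norm_num

theorem getSpecialNumberDigits_append (n : Int) (ds : List Int) :
    getSpecialNumberDigits n ds = ds ++ getSpecialNumberDigits n [] := by
  by_cases h : 0 < n
  · rw [getSpecialNumberDigits, dif_pos h,
        getSpecialNumberDigits_append (PySem.Int.floordiv n 6) (ds ++ [PySem.Int.mod n 6])]
    conv_rhs => rw [getSpecialNumberDigits, dif_pos h]; simp only [List.nil_append]
    rw [getSpecialNumberDigits_append (PySem.Int.floordiv n 6) [PySem.Int.mod n 6]]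
    simp
  · rw [getSpecialNumberDigits, dif_neg h, getSpecialNumberDigits, dif_neg h]; simp
termination_by n.toNat
decreasing_by all_goals exact pvFdivLt n h

-- A's two passes compute pvF
theorem pvA_eq_pvF (m : Int) :
    (getSpecialNumberDigits m []).reverse.foldl (fun a d => a * 10 + d) 0 = pvF m := by
  by_cases h : 0 < m
  · rw [getSpecialNumberDigits, dif_pos h]
    simp only [List.nil_append]
    rw [getSpecialNumberDigits_append (PySem.Int.floordiv m 6) [PySem.Int.mod m 6]]
    rw [show ([PySem.Int.mod m 6] ++ getSpecialNumberDigits (PySem.Int.floordiv m 6) []).reverse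
          = (getSpecialNumberDigits (PySem.Int.floordiv m 6) []).reverse ++ [PySem.Int.mod m 6] by
        simp]
    rw [List.foldl_append, pvA_eq_pvF (PySem.Int.floordiv m 6)]
    conv_rhs => rw [pvF, dif_pos h]
    simp [PySem.Int.floordiv_eq_ediv_of_pos (show (0:Int) < 6 by omega),
      PySem.Int.mod_eq_emod_of_pos (show (0:Int) < 6 by omega)]
  · rw [getSpecialNumberDigits, dif_neg h, pvF, dif_neg h]; simp
termination_by m.toNat
decreasing_by exact pvFdivLt m h

-- splitting off the top decimal digit of pvF
theorem pvF_split (k : Nat) (m : Int) (h0 : 0 ≤ m) (hk : m < 6 ^ (k + 1)) :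
    pvF m = m / 6 ^ k * 10 ^ k + pvF (m % 6 ^ k) := by
  induction k generalizing m with
  | zero =>
    simp only [pow_zero, pow_one] at *
    rw [Int.ediv_one, Int.emod_one, pvF_step m h0]
    have h1 : m / 6 = 0 := by omega
    have h2 : m % 6 = m := by omega
    rw [h1, h2, pvF_zero]
    ring
  | succ k ih =>
    have hp : (0:Int) < 6 ^ (k + 1) := by positivity
    have hq : 6 ^ (k + 1) * (m / 6 ^ (k + 1)) + m % 6 ^ (k + 1) = m :=
      Int.ediv_add_emod m (6 ^ (k + 1))
    have hr0 : 0 ≤ m % 6 ^ (k + 1) := Int.emod_nonneg m (ne_of_gt hp)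
    have hr1 : m % 6 ^ (k + 1) < 6 ^ (k + 1) := Int.emod_lt_of_pos m hp
    set q := m / 6 ^ (k + 1) with hQ
    set r := m % 6 ^ (k + 1) with hR
    have hm : m = r + q * 6 ^ k * 6 := by
      rw [← hq]; ring
    have e1 : m / 6 = r / 6 + q * 6 ^ k := by
      rw [hm, Int.add_mul_ediv_right _ _ (by omega : (6:Int) ≠ 0)]
    have e2 : m % 6 = r % 6 := by
      rw [hm, Int.add_mul_emod_self_right]
    have hpk : (0:Int) < 6 ^ k := by positivity
    have hr6 : r / 6 < 6 ^ k := by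
      have : r < 6 ^ k * 6 := by
        have : (6:Int) ^ (k + 1) = 6 ^ k * 6 := by ring
        omega
      omega
    have e3 : m / 6 / 6 ^ k = q := by
      rw [e1, Int.add_mul_ediv_right _ _ (ne_of_gt hpk),
        Int.ediv_eq_zero_of_lt (by omega) hr6]
      omega
    have e4 : m / 6 % 6 ^ k = r / 6 := by
      rw [e1, Int.add_mul_emod_self_right, Int.emod_eq_of_lt (by omega) hr6]
    have hd0 : 0 ≤ m / 6 := Int.ediv_nonneg h0 (by omega)
    have hd1 : m / 6 < 6 ^ (k + 1) := by
      have : m < 6 ^ (k + 1) * 6 := by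
        have : (6:Int) ^ (k + 1 + 1) = 6 ^ (k + 1) * 6 := by ring
        omega
      omega
    rw [pvF_step m h0, ih (m / 6) hd0 hd1, e2, e3, e4, pvF_step r hr0]
    ring

-- B's second loop computes pvF (with the found power of 6)
theorem pvDigitLoop_spec (k : Nat) (m ans : Int) (h0 : 0 ≤ m) (hk : m < 6 ^ (k + 1)) :
    pvDigitLoop ((6:Int) ^ k) m ans = ans * 10 ^ (k + 1) + pvF m := by
  induction k generalizing m ans with
  | zero =>
    rw [pvDigitLoop, dif_pos (by norm_num : (0:Int) < 6 ^ 0)]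
    simp only [pow_zero] at *
    rw [show PySem.Int.floordiv (1:Int) 6 = 0 by
          rw [PySem.Int.floordiv_eq_ediv_of_pos (by omega)]; decide,
        PySem.Int.mod_eq_emod_of_pos (by omega : (0:Int) < 1),
        PySem.Int.floordiv_eq_ediv_of_pos (by omega : (0:Int) < 1),
        Int.emod_one, Int.ediv_one]
    rw [pvDigitLoop, dif_neg (by omega)]
    have hfm : pvF m = m := by
      rw [pvF_step m h0]
      have h1 : m / 6 = 0 := by omega
      have h2 : m % 6 = m := by omega
      rw [h1, h2, pvF_zero]; ring
    rw [hfm]; ring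
  | succ k ih =>
    have hp1 : (0:Int) < 6 ^ (k + 1) := by positivity
    rw [pvDigitLoop, dif_pos hp1]
    have ef : PySem.Int.floordiv ((6:Int) ^ (k + 1)) 6 = 6 ^ k := by
      rw [PySem.Int.floordiv_eq_ediv_of_pos (by omega), pow_succ,
        Int.mul_ediv_cancel _ (by omega : (6:Int) ≠ 0)]
    rw [ef, PySem.Int.mod_eq_emod_of_pos hp1, PySem.Int.floordiv_eq_ediv_of_pos hp1]
    have hr0 : 0 ≤ m % 6 ^ (k + 1) := Int.emod_nonneg m (ne_of_gt hp1)
    have hr1 : m % 6 ^ (k + 1) < 6 ^ (k + 1) := Int.emod_lt_of_pos m hp1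
    rw [ih (m % 6 ^ (k + 1)) _ hr0 hr1, pvF_split (k + 1) m h0 hk]
    ring

-- B's first loop finds a power of 6 whose successor power bounds m
theorem pvPow6Loop_spec (j : Nat) (m : Int) (h0 : 0 ≤ m) :
    ∃ k : Nat, pvPow6Loop m ((6:Int) ^ j) = 6 ^ k ∧ m < 6 ^ (k + 1) := by
  by_cases h : (0:Int) < 6 ^ j ∧ (6:Int) ^ j * 6 ≤ m
  · rw [pvPow6Loop, dif_pos h]
    have e : (6:Int) ^ j * 6 = 6 ^ (j + 1) := by ring
    rw [e]
    exact pvPow6Loop_spec (j + 1) m h0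
  · rw [pvPow6Loop, dif_neg h]
    refine ⟨j, rfl, ?_⟩
    have hp : (0:Int) < 6 ^ j := by positivity
    have e : (6:Int) ^ (j + 1) = 6 ^ j * 6 := by ring
    push_neg at h
    have := h hp
    omega
termination_by (m - 6 ^ j).toNat
decreasing_by
  have e : (6:Int) ^ (j + 1) = 6 ^ j * 6 := by ring
  omega

-- ===== VERDICT (by name: the statement is the Claim_ definition above) =====
theorem getSpecialNumber_spec : Claim_equal_getSpecialNumber := by
  intro n _ hpre
  unfold Pre_getSpecialNumber at hpre
  unfold Spec_getSpecialNumber getSpecialNumber getSpecialNumber_alt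
  have h0 : 0 ≤ n - 1 := by omega
  obtain ⟨k, hk, hb⟩ := pvPow6Loop_spec 0 (n - 1) h0
  rw [pow_zero] at hk
  simp only []
  rw [hk, pvDigitLoop_spec k (n - 1) 0 h0 hb, pvA_eq_pvF]
  ring
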